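-- pv_equiv track=rewrite | github.com/dustndus8/programmers-algorithm | 완전탐색_모의고사.py | solution
-- ===== SOURCE A (Python) =====
-- def solution(answers):
--     cnt = [0, 0, 0]
--     a=[1,2,3,4,5]
--     b=[2,1,2,3,2,4,2,5]
--     c=[3,3,1,1,2,2,4,4,5,5]
--
--     for i in range(len(answers)):
--         if a[i%len(a)] == answers[i]:
--             cnt[0]+=1
--         if b[i%len(b)] == answers[i]:
--             cnt[1]+=1
--         if c[i%len(c)] == answers[i]:
--             cnt[2]+=1
--
--     answer = []
--     for idx, score in enumerate(cnt):
--         if score == max(cnt):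
--             answer.append(idx+1)
--     return answer
-- ===== SOURCE B (Python) =====
-- def solution(answers):
--     # All three patterns repeat with period dividing 40 (lcm of 5, 8, 10), so a
--     # histogram of (position mod 40, value) pairs determines every score.
--     hist = {}
--     for i, x in enumerate(answers):
--         k = (i % 40, x)
--         hist[k] = hist.get(k, 0) + 1
--     pats = [[1, 2, 3, 4, 5], [2, 1, 2, 3, 2, 4, 2, 5], [3, 3, 1, 1, 2, 2, 4, 4, 5, 5]]
--     scores = [sum(hist.get((r, p[r % len(p)]), 0) for r in range(40)) for p in pats]
--     best = max(scores)
--     return [j + 1 for j, s in enumerate(scores) if s == best]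
-- ===== Notes on version B (the rewrite author's own statement) =====
-- stated objective: alternative
-- what changed: Instead of comparing each answer against the three cyclic patterns, B builds in one pass a histogram dict keyed by (index mod 40, value) -- 40 = lcm of the pattern periods -- and obtains each pattern's score as 40 table lookups; the per-element pattern comparisons disappear.
import Mathlib
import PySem

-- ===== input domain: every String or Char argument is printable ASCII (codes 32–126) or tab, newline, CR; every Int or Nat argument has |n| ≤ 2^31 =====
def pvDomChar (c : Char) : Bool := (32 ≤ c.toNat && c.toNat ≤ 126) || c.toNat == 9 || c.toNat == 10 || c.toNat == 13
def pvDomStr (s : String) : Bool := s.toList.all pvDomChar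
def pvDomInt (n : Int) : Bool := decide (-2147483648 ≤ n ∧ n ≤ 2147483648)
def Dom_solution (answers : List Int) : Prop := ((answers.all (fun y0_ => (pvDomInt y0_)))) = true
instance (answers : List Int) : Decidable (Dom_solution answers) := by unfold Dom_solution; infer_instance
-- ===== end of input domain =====

-- B replaces the per-element comparison against three cyclic patterns by a one-pass
-- histogram keyed by (index mod 40, value); each score is then 40 table lookups
-- (objective: alternative algorithm, same asymptotic cost).

-- ===== PORT A =====
-- one fused loop over the indices, maintaining three counters at once
def solution (answers : List Int) : List Int :=
  let a : List Int := [1, 2, 3, 4, 5]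
  let b : List Int := [2, 1, 2, 3, 2, 4, 2, 5]
  let c : List Int := [3, 3, 1, 1, 2, 2, 4, 4, 5, 5]
  let cnt : Int × Int × Int :=
    (PySem.List.pyRange 0 (PySem.List.len answers) 1).foldl
      (fun cnt i =>
        -- all indexing is in range, so pyGetD is exact here
        let x := PySem.List.pyGetD answers i 0
        let c1 := if PySem.List.pyGetD a (PySem.Int.mod i (PySem.List.len a)) 0 = x then cnt.1 + 1 else cnt.1
        let c2 := if PySem.List.pyGetD b (PySem.Int.mod i (PySem.List.len b)) 0 = x then cnt.2.1 + 1 else cnt.2.1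
        let c3 := if PySem.List.pyGetD c (PySem.Int.mod i (PySem.List.len c)) 0 = x then cnt.2.2 + 1 else cnt.2.2
        (c1, c2, c3)) (0, 0, 0)
  let m := (PySem.List.max? [cnt.1, cnt.2.1, cnt.2.2] (fun y => y)).getD 0
  (PySem.List.enumerate [cnt.1, cnt.2.1, cnt.2.2] 0).foldl
    (fun ans p => if p.2 = m then ans ++ [p.1 + 1] else ans) []

-- ===== PORT B =====
-- one pass building the histogram hist[(i % 40, x)] += 1, then 40 lookups per pattern
def solution_alt (answers : List Int) : List Int :=
  let hist : PySem.Dict (Int × Int) Int :=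
    (PySem.List.enumerate answers 0).foldl
      (fun d p => d.insert (PySem.Int.mod p.1 40, p.2) (d.getD (PySem.Int.mod p.1 40, p.2) 0 + 1))
      PySem.Dict.empty
  let pats : List (List Int) :=
    [[1, 2, 3, 4, 5], [2, 1, 2, 3, 2, 4, 2, 5], [3, 3, 1, 1, 2, 2, 4, 4, 5, 5]]
  let scores : List Int :=
    pats.map (fun p =>
      ((PySem.List.pyRange 0 40 1).map
        (fun r => hist.getD (r, PySem.List.pyGetD p (PySem.Int.mod r (PySem.List.len p)) 0) 0)).sum)
  let best := (PySem.List.max? scores (fun y => y)).getD 0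
  (PySem.List.enumerate scores 0).foldl
    (fun acc q => if q.2 = best then acc ++ [q.1 + 1] else acc) []

-- ===== PRECONDITION & SPEC =====
def Spec_solution (answers : List Int) (out : List Int) : Prop := out = solution_alt answers
instance (answers : List Int) (out : List Int) : Decidable (Spec_solution answers out) := by unfold Spec_solution; infer_instance

-- ===== CLAIM (what is proved, stated in full; the proofs are below) =====
def Claim_equal_solution : Prop := ∀ (answers : List Int), Dom_solution answers → Spec_solution answers (solution answers)

-- ===== LEMMAS AND PROOFS =====

-- splitting A's fused three-counter fold into three independent sums
theorem foldl_triple_split (l : List Int) (f1 f2 f3 : Int → Int) (c1 c2 c3 : Int) :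
    l.foldl (fun (cnt : Int × Int × Int) i =>
        (cnt.1 + f1 i, cnt.2.1 + f2 i, cnt.2.2 + f3 i)) (c1, c2, c3)
      = (c1 + (l.map f1).sum, c2 + (l.map f2).sum, c3 + (l.map f3).sum) := by
  induction l generalizing c1 c2 c3 with
  | nil => simp
  | cons p t ih =>
    simp [List.foldl_cons, ih]
    refine ⟨by ring, by ring, by ring⟩

-- over a Nodup index list, the 0/1 indicator of one pair key sums to a single test
theorem sum_ite_pair (rs : List Int) (h : rs.Nodup) (a v : Int) (g : Int → Int) :
    (rs.map (fun r => if (r, g r) = (a, v) then (1 : Int) else 0)).sum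
      = if a ∈ rs ∧ g a = v then 1 else 0 := by
  induction rs with
  | nil => simp
  | cons r t ih =>
    simp only [List.map_cons, List.sum_cons, List.nodup_cons] at *
    rcases h with ⟨hr, ht⟩
    by_cases hra : r = a
    · subst hra
      have : ¬ (r ∈ t ∧ g r = v) := fun hc => hr hc.1
      rw [ih ht]
      simp [this, Prod.ext_iff]
    · rw [ih ht]
      simp [Prod.ext_iff, hra, Ne.symm hra]

-- summing the histogram's counts of (r, g r) over all residues r recovers the
-- per-element match count
theorem sum_count_over_range (ks : List (Int × Int)) (g : Int → Int)
    (h : ∀ k ∈ ks, k.1 ∈ PySem.List.pyRange 0 40 1) :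
    ((PySem.List.pyRange 0 40 1).map (fun r => ((ks.count (r, g r) : Int)))).sum
      = (ks.map (fun k => if g k.1 = k.2 then (1 : Int) else 0)).sum := by
  induction ks with
  | nil => simp
  | cons k t ih =>
    have hk := h k (by simp)
    have ht : ∀ k' ∈ t, k'.1 ∈ PySem.List.pyRange 0 40 1 := fun k' hk' => h k' (by simp [hk'])
    have hsplit :
        ((PySem.List.pyRange 0 40 1).map (fun r => (((k :: t).count (r, g r) : Int)))).sum
          = ((PySem.List.pyRange 0 40 1).map (fun r => ((t.count (r, g r) : Int)))).sum
            + ((PySem.List.pyRange 0 40 1).map (fun r => if (r, g r) = k then (1 : Int) else 0)).sum := by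
      rw [← PySem.List.sum_map_add_int]
      refine congrArg List.sum (List.map_congr_left ?_)
      intro r _
      by_cases he : (r, g r) = k
      · simp [he]
      · simp [List.count_cons, he]
        exact fun hc => he hc.symm
    have hnodup : (PySem.List.pyRange 0 40 1).Nodup := by decide
    rw [hsplit, ih ht, sum_ite_pair _ hnodup k.1 k.2 g]
    have : k.1 ∈ PySem.List.pyRange 0 40 1 ∧ g k.1 = k.2 ↔ g k.1 = k.2 := by
      constructor
      · exact fun hc => hc.2
      · exact fun hc => ⟨hk, hc⟩
    simp only [List.map_cons, List.sum_cons, this]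
    ring

-- taking the index mod 40 first does not change it mod the pattern length (len ∣ 40)
theorem mod_mod_forty (i L : Int) (hL : 0 < L) (hdvd : L ∣ 40) :
    PySem.Int.mod (PySem.Int.mod i 40) L = PySem.Int.mod i L := by
  simp only [PySem.Int.mod_eq_emod_of_pos (show (0:Int) < 40 by norm_num),
      PySem.Int.mod_eq_emod_of_pos hL]
  exact Int.emod_emod_of_dvd i hdvd

-- one pattern's B-score equals its A-count
theorem score_eq (answers : List Int) (p : List Int) (hL : 0 < PySem.List.len p)
    (hdvd : PySem.List.len p ∣ 40) :
    ((PySem.List.pyRange 0 40 1).map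
        (fun r =>
          (((PySem.List.enumerate answers 0).map
              (fun q => (PySem.Int.mod q.1 40, q.2))).foldl
            (fun (d : PySem.Dict (Int × Int) Int) k => d.insert k (d.getD k 0 + 1))
            PySem.Dict.empty).getD
            (r, PySem.List.pyGetD p (PySem.Int.mod r (PySem.List.len p)) 0) 0)).sum
      = ((PySem.List.pyRange 0 (PySem.List.len answers) 1).map
          (fun i => if PySem.List.pyGetD p (PySem.Int.mod i (PySem.List.len p)) 0
                      = PySem.List.pyGetD answers i 0 then (1 : Int) else 0)).sum := by
  set ks : List (Int × Int) :=
    (PySem.List.enumerate answers 0).map (fun q => (PySem.Int.mod q.1 40, q.2)) with hks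
  have hmem : ∀ k ∈ ks, k.1 ∈ PySem.List.pyRange 0 40 1 := by
    intro k hk
    rw [hks] at hk
    rcases List.mem_map.mp hk with ⟨q, _, rfl⟩
    have h0 : 0 ≤ PySem.Int.mod q.1 40 := PySem.Int.mod_nonneg _ (by norm_num)
    have h1 : PySem.Int.mod q.1 40 < 40 := PySem.Int.mod_lt _ (by norm_num)
    rw [PySem.List.mem_pyRange_one]
    constructor <;> [exact h0; exact h1]
  have hget : ∀ k, ((ks.foldl (fun (d : PySem.Dict (Int × Int) Int) k => d.insert k (d.getD k 0 + 1))
      PySem.Dict.empty).getD k 0) = (ks.count k : Int) := by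
    intro k
    rw [PySem.Dict.getD_foldl_insert_add_one]
    simp
  simp only [hget]
  rw [sum_count_over_range ks _ hmem]
  rw [hks, List.map_map]
  rw [PySem.List.enumerate_eq_map_pyRange (d := (0 : Int)), List.map_map]
  refine congrArg List.sum (List.map_congr_left ?_)
  intro i _
  simp only [Function.comp_def]
  rw [mod_mod_forty i _ hL hdvd]

-- ===== VERDICT (by name: the statement is the Claim_ definition above) =====
theorem solution_spec : Claim_equal_solution := by
  intro answers _
  unfold Spec_solution solution solution_alt
  simp only []
  -- rewrite A's fused fold as three indicator sums
  have hstep :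
      (fun (cnt : Int × Int × Int) (i : Int) =>
        (if PySem.List.pyGetD ([1,2,3,4,5] : List Int) (PySem.Int.mod i (PySem.List.len ([1,2,3,4,5] : List Int))) 0 = PySem.List.pyGetD answers i 0 then cnt.1 + 1 else cnt.1,
         if PySem.List.pyGetD ([2,1,2,3,2,4,2,5] : List Int) (PySem.Int.mod i (PySem.List.len ([2,1,2,3,2,4,2,5] : List Int))) 0 = PySem.List.pyGetD answers i 0 then cnt.2.1 + 1 else cnt.2.1,
         if PySem.List.pyGetD ([3,3,1,1,2,2,4,4,5,5] : List Int) (PySem.Int.mod i (PySem.List.len ([3,3,1,1,2,2,4,4,5,5] : List Int))) 0 = PySem.List.pyGetD answers i 0 then cnt.2.2 + 1 else cnt.2.2))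
      = (fun (cnt : Int × Int × Int) (i : Int) =>
        (cnt.1 + (if PySem.List.pyGetD ([1,2,3,4,5] : List Int) (PySem.Int.mod i (PySem.List.len ([1,2,3,4,5] : List Int))) 0 = PySem.List.pyGetD answers i 0 then (1:Int) else 0),
         cnt.2.1 + (if PySem.List.pyGetD ([2,1,2,3,2,4,2,5] : List Int) (PySem.Int.mod i (PySem.List.len ([2,1,2,3,2,4,2,5] : List Int))) 0 = PySem.List.pyGetD answers i 0 then (1:Int) else 0),
         cnt.2.2 + (if PySem.List.pyGetD ([3,3,1,1,2,2,4,4,5,5] : List Int) (PySem.Int.mod i (PySem.List.len ([3,3,1,1,2,2,4,4,5,5] : List Int))) 0 = PySem.List.pyGetD answers i 0 then (1:Int) else 0))) := by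
    funext cnt i
    split_ifs <;> simp
  rw [hstep, foldl_triple_split]
  -- rewrite B's histogram fold into the keyed form used by score_eq
  have hfold :
      (PySem.List.enumerate answers 0).foldl
        (fun (d : PySem.Dict (Int × Int) Int) p =>
          d.insert (PySem.Int.mod p.1 40, p.2) (d.getD (PySem.Int.mod p.1 40, p.2) 0 + 1))
        PySem.Dict.empty
      = ((PySem.List.enumerate answers 0).map (fun q => (PySem.Int.mod q.1 40, q.2))).foldl
          (fun (d : PySem.Dict (Int × Int) Int) k => d.insert k (d.getD k 0 + 1))
          PySem.Dict.empty := by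
    rw [List.foldl_map]
  rw [hfold]
  simp only [List.map_cons, List.map_nil]
  have h1 := score_eq answers [1,2,3,4,5] (by decide) (by decide)
  have h2 := score_eq answers [2,1,2,3,2,4,2,5] (by decide) (by decide)
  have h3 := score_eq answers [3,3,1,1,2,2,4,4,5,5] (by decide) (by decide)
  simp only [h1, h2, h3]
  simp
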